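-- pv_equiv track=rewrite | github.com/DataArcTech/ToG-3 | tog/src/utils.py | merge_retrievals_evenly
-- ===== SOURCE A (Python) =====
-- def merge_retrievals_evenly(all_retrievals, top_k, rerank=False):
--     """
--     合并多个检索结果列表，均匀地从每个子列表中提取句子，
--     避免重复句子。如果某个子列表中的句子重复，则跳过该句子，
--     尝试从同一子列表中获取下一个不重复的句子。
--
--     :param all_retrievals: List of lists，每个子列表包含字典形式的检索结果，
--                            每个字典至少包含 "document" 键。
--                            例如：
--                            [
--                                [{"document": "文档A1"}, {"document": "文档A2"}, ...],
--                                [{"document": "文档B1"}, {"document": "文档B2"}, ...],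
--                                ...
--                            ]
--     :param top_k: 要提取的总结果数量。
--     :return: 合并后的结果列表，长度最多为 top_k。
--     """
--     combined_result = []
--     seen_documents = set()
--     # 为每个子列表初始化一个索引，用于跟踪下一个要尝试的句子
--     indices = [0 for _ in all_retrievals]
--     num_sub_lists = len(all_retrievals)
--     exhausted = [False for _ in all_retrievals]  # 标记每个子列表是否已耗尽
--
--     while len(combined_result) < top_k:
--         picked_any = False
--         # 遍历每个子列表
--         for i in range(num_sub_lists):
--             if exhausted[i]:
--                 continue  # 该子列表已耗尽，跳过
--
--             current_index = indices[i]
--             sub_list = all_retrievals[i]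
--
--             # 寻找下一个不重复的句子
--             while current_index < len(sub_list):
--                 document = sub_list[current_index]["document"]
--                 indices[i] = current_index + 1  # 更新索引，无论是否添加，都要前移
--                 if document not in seen_documents:
--                     combined_result.append(sub_list[current_index])
--                     seen_documents.add(document)
--                     picked_any = True
--                     break  # 从当前子列表中成功添加一个句子，继续下一个子列表
--                 else:
--                     # 重复，尝试下一个句子
--                     current_index += 1
--
--             if current_index >= len(sub_list):
--                 exhausted[i] = True  # 该子列表已耗尽
--
--             if len(combined_result) == top_k:
--                 break  # 已达到所需的 top_k 数量
--
--         if not picked_any: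
--             # 如果在这一轮中没有任何新句子被添加，说明所有子列表都已耗尽或没有新句子
--             break
--     # if not rerank:
--     #     sorted_combined_result = sorted(combined_result, key=lambda x: x["distances"])
--     # else:
--     #     sorted_combined_result = sorted(combined_result, key=lambda x: x['score'], reverse=True)
--
--     return combined_result
-- ===== SOURCE B (Python) =====
-- def merge_retrievals_evenly(all_retrievals, top_k, rerank=False):
--     # Staged round passes: each pass maps the current active lists to this round's
--     # picks and the surviving tails; rounds stop once enough items are merged, and
--     # the merged stream is truncated to top_k at the end. No per-list index or
--     # exhausted bookkeeping, no picked_any guard, no mid-round break.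
--     merged = []
--     seen = set()
--     lists = all_retrievals
--     while lists and len(merged) < top_k:
--         survivors = []
--         for sub in lists:
--             j = 0
--             while j < len(sub) and sub[j]["document"] in seen:
--                 j += 1
--             if j < len(sub):
--                 merged.append(sub[j])
--                 seen.add(sub[j]["document"])
--                 survivors.append(sub[j + 1:])
--         lists = survivors
--     return merged[:top_k] if top_k > 0 else []
-- ===== Notes on version B (the rewrite author's own statement) =====
-- stated objective: alternative
-- what changed: Instead of A's online loop (per-list index and exhausted arrays, picked_any guard, mid-round break at top_k), B computes the deduplicated round-robin merge by staged passes -- each pass maps the current active lists to this round's picks and the surviving tails, stopping only between rounds -- and truncates the merged stream to top_k at the end; the equivalence rests on the prefix property that where the merge stops cannot change the first top_k picks.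
-- outside the precondition, e.g. on merge_retrievals_evenly([[{'document': 'a'}], [{}]], 1, False): A returns [{'document': 'a'}], B raises KeyError
import Mathlib
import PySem

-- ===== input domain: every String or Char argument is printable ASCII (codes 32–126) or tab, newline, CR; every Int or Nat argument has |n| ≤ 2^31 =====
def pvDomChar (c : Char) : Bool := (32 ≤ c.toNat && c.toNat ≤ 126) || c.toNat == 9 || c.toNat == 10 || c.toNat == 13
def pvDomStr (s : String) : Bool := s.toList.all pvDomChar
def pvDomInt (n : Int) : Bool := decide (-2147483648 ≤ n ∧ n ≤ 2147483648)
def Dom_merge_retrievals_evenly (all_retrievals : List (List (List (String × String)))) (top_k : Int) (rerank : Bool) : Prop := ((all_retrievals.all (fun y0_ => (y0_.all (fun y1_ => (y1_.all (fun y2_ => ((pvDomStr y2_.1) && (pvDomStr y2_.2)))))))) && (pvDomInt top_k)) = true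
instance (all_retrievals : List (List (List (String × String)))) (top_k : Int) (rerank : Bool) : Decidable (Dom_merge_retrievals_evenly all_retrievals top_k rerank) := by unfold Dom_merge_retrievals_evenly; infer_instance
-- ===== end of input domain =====

-- B computes the deduplicated round-robin merge by staged round passes (stopping only between rounds) and truncates to top_k at the end (alternative decomposition; same results on Pre_).


-- ===== PORT A =====
-- sub_list[i]["document"]: Python dict lookup; exact under Pre_ (key present, no duplicate keys)
def pvDocA (d : List (String × String)) : String := ((PySem.Dict.ofList d).get? "document").getD ""

-- the inner while: skip seen documents; returns (value written to indices[i], picked item with its document)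
def pvInnerA (sub : List (List (String × String))) (ci : Nat) (seen : PySem.Set String) :
    Nat × Option (List (String × String) × String) :=
  if h : ci < sub.length then
    let document := pvDocA sub[ci]
    if PySem.Set.contains seen document then pvInnerA sub (ci + 1) seen
    else (ci + 1, some (sub[ci], document))
  else (ci, none)
  termination_by sub.length - ci

structure PVStA where
  indices : List Nat
  exhausted : List Bool
  seen : PySem.Set String
  result : List (List (String × String))
  picked : Bool

-- the for i in range(num_sub_lists) loop of one outer round (with the == top_k break)
def pvRoundA (subs : List (List (List (String × String)))) (top_k : Int) (i : Nat) (st : PVStA) : PVStA :=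
  if h : i < subs.length then
    if st.exhausted.getD i true then pvRoundA subs top_k (i + 1) st
    else
      let sub := subs[i]
      let r := pvInnerA sub (st.indices.getD i 0) st.seen
      let st' :=
        match r.2 with
        | none =>
          -- current_index reached len(sub_list): exhausted[i] = True
          { st with indices := st.indices.set i r.1, exhausted := st.exhausted.set i true }
        | some (item, document) =>
          -- a fresh document was picked (current_index < len(sub_list), so exhausted[i] stays False)
          { st with indices := st.indices.set i r.1,
                    seen := PySem.Set.add st.seen document,
                    result := st.result ++ [item], picked := true }
      if (st'.result.length : Int) = top_k then st' else pvRoundA subs top_k (i + 1) st'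
  else st
  termination_by subs.length - i

-- the outer while len(combined_result) < top_k loop; fuel = total number of items + 1 bounds
-- the number of rounds (every round but the last adds at least one item to combined_result)
def pvOuterA (subs : List (List (List (String × String)))) (top_k : Int) :
    Nat → PVStA → List (List (String × String))
  | 0, st => st.result
  | fuel + 1, st =>
    if (st.result.length : Int) < top_k then
      let st' := pvRoundA subs top_k 0 { st with picked := false }
      if st'.picked then pvOuterA subs top_k fuel st' else st'.result
    else st.result

def merge_retrievals_evenly (all_retrievals : List (List (List (String × String)))) (top_k : Int) (rerank : Bool) : List (List (String × String)) :=
  pvOuterA all_retrievals top_k ((all_retrievals.map List.length).sum + 1)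
    { indices := all_retrievals.map (fun _ => 0), exhausted := all_retrievals.map (fun _ => false),
      seen := PySem.Set.empty, result := [], picked := false }

-- ===== PORT B =====
def pvDocB (d : List (String × String)) : String := ((PySem.Dict.ofList d).get? "document").getD ""

-- the j-loop of B: drop the already-seen prefix of a sublist (result = sub[j:])
def pvSkipB (sub : List (List (String × String))) (seen : PySem.Set String) :
    List (List (String × String)) :=
  match sub with
  | [] => []
  | item :: rest => if PySem.Set.contains seen (pvDocB item) then pvSkipB rest seen else item :: rest

-- one round: the for sub in lists pass; returns (picks of this round, seen after, survivors)
def pvRoundB (lists : List (List (List (String × String)))) (seen : PySem.Set String) :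
    List (List (String × String)) × PySem.Set String × List (List (List (String × String))) :=
  match lists with
  | [] => ([], seen, [])
  | sub :: rest =>
    match pvSkipB sub seen with
    | [] => pvRoundB rest seen
    | item :: tail =>
      let r := pvRoundB rest (PySem.Set.add seen (pvDocB item))
      (item :: r.1, r.2.1, tail :: r.2.2)

theorem pvSkipB_le (sub : List (List (String × String))) (seen : PySem.Set String) :
    (pvSkipB sub seen).length ≤ sub.length := by
  induction sub with
  | nil => simp [pvSkipB]
  | cons x r ih =>
    simp only [pvSkipB]
    split
    · exact Nat.le_succ_of_le ih
    · exact le_rfl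

theorem pvRoundB_measure (lists : List (List (List (String × String)))) (seen : PySem.Set String) :
    ((pvRoundB lists seen).2.2.map List.length).sum + (pvRoundB lists seen).2.2.length ≤
      (lists.map List.length).sum := by
  induction lists generalizing seen with
  | nil => simp [pvRoundB]
  | cons sub rest ih =>
    simp only [pvRoundB]
    rcases hs : pvSkipB sub seen with _ | ⟨item, tail⟩
    · have := ih seen; simp only [List.map_cons, List.sum_cons]; omega
    · have h1 := ih (PySem.Set.add seen (pvDocB item))
      have h2 : tail.length + 1 ≤ sub.length := by
        have := pvSkipB_le sub seen; rw [hs] at this; simpa using this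
      simp only [List.map_cons, List.sum_cons, List.length_cons]; omega

-- the while lists and len(merged) < top_k loop: append the round's picks, recurse on the survivors
def pvLoopB (top_k : Int) (lists : List (List (List (String × String)))) (seen : PySem.Set String)
    (merged : List (List (String × String))) : List (List (String × String)) :=
  match lists with
  | [] => merged
  | sub :: rest =>
    if (merged.length : Int) < top_k then
      let r := pvRoundB (sub :: rest) seen
      pvLoopB top_k r.2.2 r.2.1 (merged ++ r.1)
    else merged
  termination_by (lists.map List.length).sum + lists.length
  decreasing_by
    have := pvRoundB_measure (sub :: rest) seen
    simp only [List.map_cons, List.sum_cons, List.length_cons] at this ⊢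
    omega

def merge_retrievals_evenly_alt (all_retrievals : List (List (List (String × String)))) (top_k : Int) (rerank : Bool) : List (List (String × String)) :=
  if 0 < top_k then (pvLoopB top_k all_retrievals PySem.Set.empty []).take top_k.toNat else []

-- ===== PRECONDITION & SPEC =====
-- When top_k > 0, Pre_ excludes inputs containing an item dict without a "document" key: Python A
-- raises KeyError when it visits such a dict, and B — whose round passes also visit items A stops
-- before — raises KeyError on some inputs where A still returns (A never reaches the bad dict).
def Pre_merge_retrievals_evenly (all_retrievals : List (List (List (String × String)))) (top_k : Int) (rerank : Bool) : Prop :=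
  top_k ≤ 0 ∨ ∀ sub ∈ all_retrievals, ∀ d ∈ sub, "document" ∈ d.map Prod.fst
instance (all_retrievals : List (List (List (String × String)))) (top_k : Int) (rerank : Bool) : Decidable (Pre_merge_retrievals_evenly all_retrievals top_k rerank) := by unfold Pre_merge_retrievals_evenly; infer_instance

def pvWitness_merge_retrievals_evenly : (List (List (List (String × String)))) × Int × Bool :=
  ([[[("document", "a")], [("document", "b")]], [[("document", "a")]]], 2, false)

def Spec_merge_retrievals_evenly (all_retrievals : List (List (List (String × String)))) (top_k : Int) (rerank : Bool) (out : List (List (String × String))) : Prop := out = merge_retrievals_evenly_alt all_retrievals top_k rerank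
instance (all_retrievals : List (List (List (String × String)))) (top_k : Int) (rerank : Bool) (out : List (List (String × String))) : Decidable (Spec_merge_retrievals_evenly all_retrievals top_k rerank out) := by unfold Spec_merge_retrievals_evenly; infer_instance

-- ===== CLAIM (what is proved, stated in full; the proofs are below) =====
def Claim_equal_merge_retrievals_evenly : Prop := ∀ (all_retrievals : List (List (List (String × String)))) (top_k : Int) (rerank : Bool), Dom_merge_retrievals_evenly all_retrievals top_k rerank → Pre_merge_retrievals_evenly all_retrievals top_k rerank → Spec_merge_retrievals_evenly all_retrievals top_k rerank (merge_retrievals_evenly all_retrievals top_k rerank)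

-- ===== LEMMAS AND PROOFS =====

-- list-update facts used to track A's indices/exhausted arrays
theorem pvSetD_ne {a : Type} (l : List a) (i j : Nat) (v d : a) (h : i ≠ j) :
    (l.set i v).getD j d = l.getD j d := by
  simp [List.getD_eq_getElem?_getD, List.getElem?_set_ne h]

theorem pvSetD_self {a : Type} (l : List a) (i : Nat) (v d : a) (h : i < l.length) :
    (l.set i v).getD i d = v := by
  simp [List.getD_eq_getElem?_getD, h]

theorem pvSetD_true : ∀ (l : List Bool) (i : Nat), (l.set i true).getD i true = true
  | [], _ => rfl
  | _ :: _, 0 => rfl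
  | _ :: l, i + 1 => pvSetD_true l i

theorem pvMapConstD {a b : Type} (l : List a) (c d : b) (j : Nat) :
    (l.map (fun _ => c)).getD j d = if j < l.length then c else d := by
  by_cases h : j < l.length <;>
    simp [List.getD_eq_getElem?_getD, List.getElem?_map, List.getElem?_eq_getElem,
      List.getElem?_eq_none_iff, h, le_of_not_gt]

-- the active suffixes recorded in A's state, positions lo..lo+len
def pvQ (subs : List (List (List (String × String)))) (ind : List Nat) (exh : List Bool)
    (lo len : Nat) : List (List (List (String × String))) :=
  ((List.range' lo len).filter (fun j => !(exh.getD j true))).map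
    (fun j => (subs.getD j []).drop (ind.getD j 0))

-- pvQ only reads the arrays inside [lo, lo+len)
theorem pvQ_congr {subs : List (List (List (String × String)))}
    {ind ind' : List Nat} {exh exh' : List Bool} {lo len : Nat}
    (he : ∀ j, lo ≤ j → j < lo + len → exh'.getD j true = exh.getD j true)
    (hi : ∀ j, lo ≤ j → j < lo + len → ind'.getD j 0 = ind.getD j 0) :
    pvQ subs ind' exh' lo len = pvQ subs ind exh lo len := by
  unfold pvQ
  rw [List.filter_congr (fun j hj => by
    rw [he j (List.mem_range'_1.1 hj).1 (List.mem_range'_1.1 hj).2])]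
  exact List.map_congr_left (fun j hj => by
    have hm := List.mem_range'_1.1 (List.mem_of_mem_filter hj)
    rw [hi j hm.1 hm.2])

theorem pvQ_zero (subs : List (List (List (String × String))))
    (ind : List Nat) (exh : List Bool) (lo : Nat) : pvQ subs ind exh lo 0 = [] := rfl

theorem pvQ_cons (subs : List (List (List (String × String))))
    (ind : List Nat) (exh : List Bool) (lo len : Nat) :
    pvQ subs ind exh lo (len + 1) =
      (if exh.getD lo true then [] else [(subs.getD lo []).drop (ind.getD lo 0)]) ++
        pvQ subs ind exh (lo + 1) len := by
  unfold pvQ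
  rw [List.range'_succ]
  simp only [List.getD_eq_getElem?_getD]
  by_cases h : exh[lo]?.getD true = true <;> simp [h, List.filter_cons]

theorem pvQ_concat (subs : List (List (List (String × String))))
    (ind : List Nat) (exh : List Bool) (lo len : Nat) :
    pvQ subs ind exh lo (len + 1) =
      pvQ subs ind exh lo len ++
        (if exh.getD (lo + len) true then []
         else [(subs.getD (lo + len) []).drop (ind.getD (lo + len) 0)]) := by
  unfold pvQ
  rw [List.range'_1_concat]
  simp only [List.getD_eq_getElem?_getD]
  by_cases h : exh[lo + len]?.getD true = true <;> simp [h, List.filter_append]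

-- at the initial state the queue is the input itself
theorem pvQ_init_aux (subs : List (List (List (String × String)))) :
    ∀ n, n ≤ subs.length →
      pvQ subs (subs.map fun _ => 0) (subs.map fun _ => false) 0 n = subs.take n := by
  intro n
  induction n with
  | zero => intro _; rfl
  | succ n ih =>
    intro hn
    have h : n < subs.length := by omega
    have e1 : ((subs.map fun _ => (false : Bool)).getD (0 + n) true) = false := by
      rw [pvMapConstD]; simp [h]
    have e2 : ((subs.map fun _ => (0 : Nat)).getD (0 + n) 0) = 0 := by
      rw [pvMapConstD]; simp [h]
    rw [pvQ_concat, ih (by omega), e1, e2, if_neg (by simp)]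
    rw [show subs.getD (0 + n) [] = subs[n] from by
      simp [List.getD_eq_getElem?_getD, List.getElem?_eq_getElem h]]
    rw [List.drop_zero, List.take_succ, List.getElem?_eq_getElem h]
    rfl

theorem pvQ_init (subs : List (List (List (String × String)))) :
    pvQ subs (subs.map fun _ => 0) (subs.map fun _ => false) 0 subs.length = subs := by
  rw [pvQ_init_aux subs subs.length le_rfl, List.take_length]

-- A's inner while loop computes exactly what B's seen-prefix skip computes
theorem pvInnerA_eq (sub : List (List (String × String))) (ci : Nat) (seen : PySem.Set String) :
    (pvSkipB (sub.drop ci) seen = [] → (pvInnerA sub ci seen).2 = none) ∧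
    (∀ item tail, pvSkipB (sub.drop ci) seen = item :: tail →
      ∃ v, pvInnerA sub ci seen = (v, some (item, pvDocB item)) ∧ sub.drop v = tail) := by
  induction ci using pvInnerA.induct (sub := sub) (seen := seen) with
  | case1 ci h _doc hc ih =>
    rw [List.drop_eq_getElem_cons h]
    have hc' : PySem.Set.contains seen (pvDocB sub[ci]) = true := hc
    constructor
    · intro hs
      rw [pvInnerA, dif_pos h, if_pos hc]
      refine ih.1 ?_
      simp only [pvSkipB] at hs
      rwa [if_pos hc'] at hs
    · intro item tail hs
      rw [pvInnerA, dif_pos h, if_pos hc]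
      refine ih.2 item tail ?_
      simp only [pvSkipB] at hs
      rwa [if_pos hc'] at hs
  | case2 ci h _doc hc =>
    rw [List.drop_eq_getElem_cons h]
    have hc' : PySem.Set.contains seen (pvDocB sub[ci]) = false := Bool.eq_false_iff.mpr hc
    constructor
    · intro hs
      simp only [pvSkipB] at hs
      rw [if_neg (by rw [hc']; simp)] at hs
      exact (List.cons_ne_nil _ _ hs).elim
    · intro item tail hs
      simp only [pvSkipB] at hs
      rw [if_neg (by rw [hc']; simp)] at hs
      injection hs with h1 h2
      refine ⟨ci + 1, ?_, ?_⟩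
      · rw [pvInnerA, dif_pos h, if_neg hc]
        simp [pvDocA, pvDocB, h1]
      · exact h2
  | case3 ci h =>
    rw [List.drop_eq_nil_of_le (by omega)]
    constructor
    · intro _; rw [pvInnerA, dif_neg h]
    · intro item tail hs; simp [pvSkipB] at hs

-- the UNTRUNCATED round loop (proof helper): the full deduplicated merged stream
def pvLoopBI (lists : List (List (List (String × String)))) (seen : PySem.Set String) :
    List (List (String × String)) :=
  match lists with
  | [] => []
  | sub :: rest =>
    let r := pvRoundB (sub :: rest) seen
    r.1 ++ pvLoopBI r.2.2 r.2.1
  termination_by (lists.map List.length).sum + lists.length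
  decreasing_by
    have := pvRoundB_measure (sub :: rest) seen
    simp only [List.map_cons, List.sum_cons, List.length_cons] at this ⊢
    omega

-- unfolding equations for B's round and loop
theorem pvRoundB_cons_nil (sub : List (List (String × String)))
    (rest : List (List (List (String × String)))) (seen : PySem.Set String)
    (h : pvSkipB sub seen = []) : pvRoundB (sub :: rest) seen = pvRoundB rest seen := by
  rw [pvRoundB]; rw [h]

theorem pvLoopBI_nil (seen : PySem.Set String) : pvLoopBI [] seen = [] := by rw [pvLoopBI]

theorem pvLoopBI_eq (lists : List (List (List (String × String)))) (seen : PySem.Set String) :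
    pvLoopBI lists seen =
      (pvRoundB lists seen).1 ++ pvLoopBI (pvRoundB lists seen).2.2 (pvRoundB lists seen).2.1 := by
  cases lists with
  | nil => simp [pvLoopBI, pvRoundB]
  | cons sub rest => rw [pvLoopBI]

-- the truncated loop of port B computes the same top_k-prefix as the untruncated stream
theorem pvLoopB_take (top_k : Int) :
    ∀ (m : Nat) (lists : List (List (List (String × String)))) (seen : PySem.Set String)
      (merged : List (List (String × String))), (lists.map List.length).sum + lists.length = m →
      (pvLoopB top_k lists seen merged).take top_k.toNat =
        (merged ++ pvLoopBI lists seen).take top_k.toNat := by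
  intro m
  induction m using Nat.strong_induction_on with
  | _ m IH =>
    intro lists seen merged hm
    cases lists with
    | nil => rw [pvLoopB, pvLoopBI_nil, List.append_nil]
    | cons sub rest =>
      rw [pvLoopB]
      by_cases hlt : ((merged.length : Int) < top_k)
      · rw [if_pos hlt]
        have hmeas := pvRoundB_measure (sub :: rest) seen
        have := IH (((pvRoundB (sub :: rest) seen).2.2.map List.length).sum +
            (pvRoundB (sub :: rest) seen).2.2.length)
          (by
            simp only [List.map_cons, List.sum_cons, List.length_cons] at hmeas hm ⊢
            omega)
          (pvRoundB (sub :: rest) seen).2.2 (pvRoundB (sub :: rest) seen).2.1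
          (merged ++ (pvRoundB (sub :: rest) seen).1) rfl
        rw [this, List.append_assoc, ← pvLoopBI_eq]
      · rw [if_neg hlt, List.take_append_of_le_length (by omega)]

-- the remaining stream of B when a round is in progress: front = lists not yet processed this
-- round, back = survivors already collected this round
def pvStreamB (front back : List (List (List (String × String)))) (seen : PySem.Set String) :
    List (List (String × String)) :=
  (pvRoundB front seen).1 ++ pvLoopBI (back ++ (pvRoundB front seen).2.2) (pvRoundB front seen).2.1

theorem pvStreamB_nil_back (q : List (List (List (String × String)))) (seen : PySem.Set String) :
    pvStreamB q [] seen = pvLoopBI q seen := by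
  rw [pvStreamB, List.nil_append, ← pvLoopBI_eq]

theorem pvOuterA_stop (subs : List (List (List (String × String)))) (top_k : Int)
    (fuel : Nat) (st : PVStA) (h : ¬ ((st.result.length : Int) < top_k)) :
    pvOuterA subs top_k fuel st = st.result := by
  cases fuel <;> simp [pvOuterA, h]

-- THE BRIDGE: finishing A's current round at position i and continuing the outer loop equals
-- result ++ (the truncated remaining stream of B), where front = A's active suffixes at
-- positions i.. and back = the active suffixes at positions <i (this round's survivors so far)
theorem pvBridgeAux (subs : List (List (List (String × String)))) (top_k : Int) :
    ∀ (m fuel i : Nat) (st : PVStA),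
      fuel * (subs.length + 1) + (subs.length - i) = m →
      st.indices.length = subs.length → st.exhausted.length = subs.length → i ≤ subs.length →
      (st.result.length : Int) < top_k →
      (st.picked = false → pvQ subs st.indices st.exhausted 0 i = []) →
      (((pvQ subs st.indices st.exhausted i (subs.length - i) ++
          pvQ subs st.indices st.exhausted 0 i).map List.length).sum +
        (if st.picked then 2 else 1) ≤ fuel + 1) →
      (if (pvRoundA subs top_k i st).picked then pvOuterA subs top_k fuel (pvRoundA subs top_k i st)
       else (pvRoundA subs top_k i st).result)
      = st.result ++ (pvStreamB (pvQ subs st.indices st.exhausted i (subs.length - i))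
          (pvQ subs st.indices st.exhausted 0 i) st.seen).take (top_k - st.result.length).toNat := by
  intro m
  induction m using Nat.strong_induction_on with
  | _ m IH =>
    intro fuel i st hm hlen1 hlen2 hin hlt hpk hf
    by_cases hi : i < subs.length
    · -- mid-round, position i to process
      have hni : subs.length - i = (subs.length - (i + 1)) + 1 := by omega
      by_cases hex : st.exhausted.getD i true = true
      · -- exhausted[i]: skip
        have hR : pvRoundA subs top_k i st = pvRoundA subs top_k (i + 1) st := by
          rw [pvRoundA, dif_pos hi, if_pos hex]
        have hF : pvQ subs st.indices st.exhausted i (subs.length - i) =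
            pvQ subs st.indices st.exhausted (i + 1) (subs.length - (i + 1)) := by
          rw [hni, pvQ_cons, if_pos hex, List.nil_append]
        have hB : pvQ subs st.indices st.exhausted 0 (i + 1) =
            pvQ subs st.indices st.exhausted 0 i := by
          rw [pvQ_concat, if_pos (by simpa using hex), List.append_nil]
        rw [hR, hF, ← hB]
        exact IH (fuel * (subs.length + 1) + (subs.length - (i + 1))) (by subst hm; omega) fuel (i + 1) st
          rfl hlen1 hlen2 (by omega) hlt (fun hp => (hB.trans (hpk hp)))
          (by rw [hF, ← hB] at hf; exact hf)
      · -- active: A scans sub i from indices[i]; B's round processes the corresponding suffix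
        have hgd : subs.getD i [] = subs[i] := List.getD_eq_getElem subs [] hi
        have hexF : st.exhausted[i]?.getD true = false := by
          rw [← List.getD_eq_getElem?_getD]
          revert hex; cases st.exhausted.getD i true <;> simp
        have hF : pvQ subs st.indices st.exhausted i (subs.length - i) =
            (subs[i].drop (st.indices.getD i 0)) ::
              pvQ subs st.indices st.exhausted (i + 1) (subs.length - (i + 1)) := by
          rw [hni, pvQ_cons, if_neg (by simp [hexF]), hgd, List.singleton_append]
        rcases hscan : pvSkipB (subs[i].drop (st.indices.getD i 0)) st.seen with _ | ⟨item, tail⟩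
        · -- the suffix is exhausted: B's round drops it, A marks exhausted[i]
          have hinner := (pvInnerA_eq subs[i] (st.indices.getD i 0) st.seen).1 hscan
          obtain ⟨v, hv⟩ : ∃ v, pvInnerA subs[i] (st.indices.getD i 0) st.seen = (v, none) :=
            ⟨(pvInnerA subs[i] (st.indices.getD i 0) st.seen).1,
              Prod.ext_iff.mpr ⟨rfl, hinner⟩⟩
          set st' : PVStA :=
            { st with indices := st.indices.set i v, exhausted := st.exhausted.set i true }
            with hst'
          have hR : pvRoundA subs top_k i st = pvRoundA subs top_k (i + 1) st' := by
            rw [pvRoundA, dif_pos hi, if_neg (by simp [hexF])]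
            dsimp only
            rw [hv]
            dsimp only
            rw [if_neg (by omega)]
          have hF' : pvQ subs st'.indices st'.exhausted (i + 1) (subs.length - (i + 1)) =
              pvQ subs st.indices st.exhausted (i + 1) (subs.length - (i + 1)) :=
            pvQ_congr (fun j h1 h2 => pvSetD_ne _ i j _ _ (by omega))
              (fun j h1 h2 => pvSetD_ne _ i j _ _ (by omega))
          have hB' : pvQ subs st'.indices st'.exhausted 0 (i + 1) =
              pvQ subs st.indices st.exhausted 0 i := by
            rw [pvQ_concat]
            rw [show (st'.exhausted.getD (0 + i) true) = true from by
              simp only [hst', Nat.zero_add]; exact pvSetD_true _ _]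
            simp only [if_pos, List.append_nil]
            exact pvQ_congr (fun j h1 h2 => pvSetD_ne _ i j _ _ (by omega))
              (fun j h1 h2 => pvSetD_ne _ i j _ _ (by omega))
          have hS : pvStreamB (pvQ subs st.indices st.exhausted i (subs.length - i))
              (pvQ subs st.indices st.exhausted 0 i) st.seen =
              pvStreamB (pvQ subs st.indices st.exhausted (i + 1) (subs.length - (i + 1)))
                (pvQ subs st.indices st.exhausted 0 i) st.seen := by
            rw [hF]; unfold pvStreamB; rw [pvRoundB_cons_nil _ _ _ hscan]
          rw [hR, hS]
          have := IH (fuel * (subs.length + 1) + (subs.length - (i + 1))) (by subst hm; omega) fuel (i + 1) st'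
            rfl (by simp [hst', hlen1]) (by simp [hst', hlen2]) (by omega)
            (by simpa [hst'] using hlt)
            (fun hp => by rw [hB']; exact hpk (by simpa [hst'] using hp))
            (by
              rw [hF', hB']
              rw [hF] at hf
              simp only [List.map_append, List.sum_append, List.map_cons, List.sum_cons] at hf ⊢
              simp only [hst']
              omega)
          rw [hF', hB'] at this
          simpa [hst'] using this
        · -- a fresh document: B's round picks item and keeps tail as a survivor; so does A
          obtain ⟨v, hinner, hdrop⟩ :=
            (pvInnerA_eq subs[i] (st.indices.getD i 0) st.seen).2 item tail hscan
          have htaillt : tail.length < (subs[i].drop (st.indices.getD i 0)).length := by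
            have := pvSkipB_le (subs[i].drop (st.indices.getD i 0)) st.seen
            rw [hscan] at this; simpa using this
          set st' : PVStA :=
            { st with indices := st.indices.set i v,
                      seen := PySem.Set.add st.seen (pvDocB item),
                      result := st.result ++ [item], picked := true }
            with hst'
          have hR : pvRoundA subs top_k i st =
              (if ((st.result.length + 1 : Int) = top_k) then st'
               else pvRoundA subs top_k (i + 1) st') := by
            rw [pvRoundA, dif_pos hi, if_neg (by simp [hexF])]
            dsimp only
            rw [hinner]
            dsimp only
            rw [show ((((st.result ++ [item]).length : Nat)) : Int) =
              (st.result.length : Int) + 1 from by simp]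
          have hF' : pvQ subs st'.indices st'.exhausted (i + 1) (subs.length - (i + 1)) =
              pvQ subs st.indices st.exhausted (i + 1) (subs.length - (i + 1)) :=
            pvQ_congr (fun j h1 h2 => rfl)
              (fun j h1 h2 => pvSetD_ne _ i j _ _ (by omega))
          have hB' : pvQ subs st'.indices st'.exhausted 0 (i + 1) =
              pvQ subs st.indices st.exhausted 0 i ++ [tail] := by
            rw [pvQ_concat]
            simp only [Nat.zero_add, hst']
            rw [if_neg (by simp [hexF])]
            rw [pvSetD_self _ _ _ _ (by omega), hgd, hdrop]
            congr 1
            exact pvQ_congr (fun j h1 h2 => rfl)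
              (fun j h1 h2 => pvSetD_ne _ i j _ _ (by omega))
          -- B's stream at the old state starts with item, then the stream after the pick
          have hS : pvStreamB (pvQ subs st.indices st.exhausted i (subs.length - i))
              (pvQ subs st.indices st.exhausted 0 i) st.seen =
              item :: pvStreamB (pvQ subs st.indices st.exhausted (i + 1) (subs.length - (i + 1)))
                (pvQ subs st.indices st.exhausted 0 i ++ [tail])
                (PySem.Set.add st.seen (pvDocB item)) := by
            rw [hF]; unfold pvStreamB
            rw [pvRoundB]; rw [hscan]
            simp
          have htake : (top_k - (st.result.length : Int)).toNat =
              (top_k - ((st.result.length : Int) + 1)).toNat + 1 := by omega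
          rw [hR, hS, htake, List.take_succ_cons]
          by_cases htop : ((st.result.length + 1 : Int) = top_k)
          · rw [if_pos htop]
            have hstop : ¬ (((st.result ++ [item]).length : Int) < top_k) := by
              simp; omega
            have : (top_k - ((st.result.length : Int) + 1)).toNat = 0 := by omega
            rw [this, List.take_zero]
            simp only [hst']
            rw [pvOuterA_stop _ _ _ _ (by simpa using hstop)]
            simp
          · rw [if_neg htop]
            have := IH (fuel * (subs.length + 1) + (subs.length - (i + 1))) (by subst hm; omega) fuel (i + 1) st'
              rfl (by simp [hst', hlen1]) (by simp [hst', hlen2]) (by omega)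
              (by simp only [hst']; simp; omega)
              (fun hp => by simp [hst'] at hp)
              (by
                rw [hF', hB']
                rw [hF] at hf
                have hl : (1 : Nat) ≤ (if st.picked = true then 2 else 1) := by split <;> omega
                simp only [List.map_append, List.sum_append, List.map_cons, List.sum_cons,
                  List.map_nil, List.sum_nil, hst', if_true] at hf ⊢
                omega)
            rw [hF', hB'] at this
            simp only [hst'] at this ⊢
            rw [this, List.append_assoc]
            simp
    · -- i = subs.length: the round is over
      have hieq : i = subs.length := by omega
      have hR : pvRoundA subs top_k i st = st := by rw [pvRoundA]; simp [hi]
      have hF : subs.length - i = 0 := by omega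
      rw [hR, hF, pvQ_zero]
      have hSB : pvStreamB [] (pvQ subs st.indices st.exhausted 0 i) st.seen =
          pvLoopBI (pvQ subs st.indices st.exhausted 0 i) st.seen := by
        unfold pvStreamB; rw [pvRoundB]; simp [← pvLoopBI_eq]
      rw [hSB]
      cases hp : st.picked with
      | false =>
        simp only [hp, Bool.false_eq_true, ↓reduceIte]
        rw [hpk hp, pvLoopBI_nil]
        simp
      | true =>
        simp only [hp, ↓reduceIte]
        rcases fuel with _ | f
        · exfalso
          rw [hF, pvQ_zero, List.nil_append, hp] at hf
          simp only [↓reduceIte] at hf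
          omega
        · rw [pvOuterA]
          simp only [hlt, if_pos]
          have := IH (f * (subs.length + 1) + subs.length)
            (by
              have hexp : (f + 1) * (subs.length + 1) = f * (subs.length + 1) + (subs.length + 1) := by
                ring
              omega) f 0 { st with picked := false }
            (by simp) hlen1 hlen2 (by omega) hlt
            (fun _ => pvQ_zero subs _ _ 0)
            (by
              simp only [pvQ_zero, List.append_nil, Nat.sub_zero, Bool.false_eq_true,
                ↓reduceIte]
              rw [hF, pvQ_zero, List.nil_append, hp] at hf
              simp only [↓reduceIte] at hf
              rw [hieq] at hf
              omega)
          simp only [Nat.sub_zero, pvQ_zero, List.append_nil] at this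
          rw [this, hieq, pvStreamB_nil_back]

-- ===== VERDICT (by name: the statement is the Claim_ definition above) =====
theorem merge_retrievals_evenly_spec : Claim_equal_merge_retrievals_evenly := by
  intro subs top_k rerank _ _
  unfold Spec_merge_retrievals_evenly merge_retrievals_evenly merge_retrievals_evenly_alt
  by_cases hk : (0 : Int) < top_k
  · rw [if_pos hk]
    set st0 : PVStA :=
      { indices := subs.map (fun _ => 0), exhausted := subs.map (fun _ => false),
        seen := PySem.Set.empty, result := [], picked := false } with hst0
    have hstep : pvOuterA subs top_k ((subs.map List.length).sum + 1) st0 =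
        (if (pvRoundA subs top_k 0 st0).picked
         then pvOuterA subs top_k ((subs.map List.length).sum) (pvRoundA subs top_k 0 st0)
         else (pvRoundA subs top_k 0 st0).result) := by
      rw [pvOuterA]
      simp only [hst0, List.length_nil, Int.natCast_zero, hk, if_pos]
    have hbr := pvBridgeAux subs top_k
      ((subs.map List.length).sum * (subs.length + 1) + subs.length)
      ((subs.map List.length).sum) 0 st0 rfl (by simp [hst0]) (by simp [hst0]) (by omega)
      (by simp [hst0]; exact hk) (fun _ => pvQ_zero subs _ _ 0)
      (by
        simp only [hst0, Nat.sub_zero, pvQ_zero, List.append_nil]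
        rw [pvQ_init subs]
        simp)
    rw [hstep, hbr]
    simp only [hst0, Nat.sub_zero, pvQ_zero, List.append_nil]
    rw [pvQ_init subs, pvStreamB_nil_back]
    rw [pvLoopB_take top_k ((subs.map List.length).sum + subs.length) subs PySem.Set.empty [] rfl]
    simp
  · rw [if_neg hk, pvOuterA]
    simp [hk]
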